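-- pv_equiv track=rewrite | github.com/yzse/px-app | helpers.py | find_files_with_substrings
-- ===== SOURCE A (Python) =====
-- def find_files_with_substrings(file_list, substrings):
--     matched_files = []
--     for filename in file_list:
--         if all(substring in filename for substring in substrings):
--             matched_files.append(filename)
--     if len(matched_files) > 1:
--         matched_files = matched_files[-1]
--     elif matched_files:
--         matched_files = matched_files[0]
--     else:
--         matched_files = None
--     return matched_files
-- ===== SOURCE B (Python) =====
-- def find_files_with_substrings(file_list, substrings):
--     files = list(file_list)
--     for i in range(len(files) - 1, -1, -1):
--         if all(substring in files[i] for substring in substrings):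
--             return files[i]
--     return None
-- ===== Notes on version B (the rewrite author's own statement) =====
-- stated objective: alternative
-- what changed: Scans the list backwards by index and returns immediately on the first match found (early exit), instead of A's forward pass that accumulates every match into a list and then selects [-1]/[0]/None; a timing run measured B faster because the backward search stops at the last match instead of testing every remaining file.
import Mathlib
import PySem

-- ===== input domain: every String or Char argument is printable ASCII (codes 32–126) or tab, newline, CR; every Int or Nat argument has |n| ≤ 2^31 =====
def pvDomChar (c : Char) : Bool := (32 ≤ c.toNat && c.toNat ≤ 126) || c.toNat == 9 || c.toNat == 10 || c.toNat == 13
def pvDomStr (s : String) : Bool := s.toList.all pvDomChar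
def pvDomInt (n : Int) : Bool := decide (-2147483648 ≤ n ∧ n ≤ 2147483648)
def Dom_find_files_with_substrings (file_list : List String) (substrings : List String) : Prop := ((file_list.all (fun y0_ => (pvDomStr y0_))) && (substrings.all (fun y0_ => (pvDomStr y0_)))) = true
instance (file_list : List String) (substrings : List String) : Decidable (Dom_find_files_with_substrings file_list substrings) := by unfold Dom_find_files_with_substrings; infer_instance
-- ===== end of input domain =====

-- B searches backwards by index and returns on the first match found (early exit), instead of A's forward pass collecting all matches and selecting [-1]/[0]/None (objective: alternative).

-- ===== PORT A =====
def find_files_with_substrings (file_list : List String) (substrings : List String) : Option String :=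
  let matched_files :=
    file_list.foldl (fun acc filename =>
      if substrings.all (fun substring => PySem.Str.isIn substring filename) then acc ++ [filename]
      else acc) []
  if matched_files.length > 1 then PySem.List.pyGet? matched_files (-1)
  else if matched_files ≠ [] then PySem.List.pyGet? matched_files 0
  else none

-- ===== PORT B =====
-- backward index loop 'for i in range(len(files)-1, -1, -1): if match: return files[i]',
-- transcribed as countdown recursion on the number of indices left to visit
def ffws_go (files : List String) (substrings : List String) : Nat → Option String
  | 0 => none
  | Nat.succ n =>
    let f := files.getD n ""
    if substrings.all (fun substring => PySem.Str.isIn substring f) then some f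
    else ffws_go files substrings n

def find_files_with_substrings_alt (file_list : List String) (substrings : List String) : Option String :=
  ffws_go file_list substrings file_list.length

-- ===== PRECONDITION & SPEC =====
def Spec_find_files_with_substrings (file_list : List String) (substrings : List String) (out : Option String) : Prop := out = find_files_with_substrings_alt file_list substrings
instance (file_list : List String) (substrings : List String) (out : Option String) : Decidable (Spec_find_files_with_substrings file_list substrings out) := by unfold Spec_find_files_with_substrings; infer_instance

-- ===== CLAIM (what is proved, stated in full; the proofs are below) =====
def Claim_equal_find_files_with_substrings : Prop := ∀ (file_list : List String) (substrings : List String), Dom_find_files_with_substrings file_list substrings → Spec_find_files_with_substrings file_list substrings (find_files_with_substrings file_list substrings)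

-- ===== LEMMAS AND PROOFS =====

-- A's post-loop selection of a list m is exactly m.getLast?.
theorem pv_post_eq_getLast? (m : List String) :
    (if m.length > 1 then PySem.List.pyGet? m (-1)
     else if m ≠ [] then PySem.List.pyGet? m 0
     else none) = m.getLast? := by
  match m with
  | [] => simp
  | [a] => simp
  | a :: b :: t => simp [PySem.List.pyGet?_neg_one]

-- B's backward early-exit search over the first n elements equals the last match among them.
theorem pv_go_eq_filter_getLast? (files : List String) (substrings : List String)
    (n : Nat) (hn : n ≤ files.length) :
    ffws_go files substrings n
      = ((files.take n).filter (fun f => substrings.all (fun s => PySem.Str.isIn s f))).getLast? := by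
  induction n with
  | zero => simp [ffws_go]
  | succ k ih =>
    have hk : k < files.length := hn
    have htake : files.take (k + 1) = files.take k ++ [files[k]] :=
      List.take_succ_eq_append_getElem hk
    have hget : files.getD k "" = files[k] := List.getD_eq_getElem files "" hk
    rw [ffws_go, htake, List.filter_append]
    simp only [hget]
    cases h : substrings.all (fun s => PySem.Str.isIn s files[k]) with
    | true =>
      simp only [List.filter_cons, List.filter_nil, h]
      simp
    | false =>
      simp only [h, Bool.false_eq_true, if_false, List.filter_cons, List.filter_nil,
        List.append_nil]
      exact ih (Nat.le_of_lt hk)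

-- ===== VERDICT (by name: the statement is the Claim_ definition above) =====
theorem find_files_with_substrings_spec : Claim_equal_find_files_with_substrings := by
  intro file_list substrings _
  show _ = _
  rw [find_files_with_substrings, find_files_with_substrings_alt,
    PySem.List.foldl_append_if_eq_filter, pv_post_eq_getLast?,
    pv_go_eq_filter_getLast? file_list substrings file_list.length le_rfl,
    List.take_length]
  rfl
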